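-- pv_equiv track=rewrite | github.com/GitofHJH/Programmers-with-Python | Level_1/옹알이 (2).py | canspeak
-- ===== SOURCE A (Python) =====
-- def canspeak(bab):
--     speakList = ['aya', 'ye', 'woo', 'ma']
--     if bab[:2] in speakList:
--         present = bab[:2]
--         bab = bab[2:]
--         if bab == "":
--             return True
--         elif len(bab) < 2 or bab[:2] == present:
--             return False
--         else:
--             canspeak(bab)
--     elif bab[:3] in speakList:
--         present = bab[:3]
--         bab = bab[3:]
--         if bab == "":
--             return True
--         elif len(bab) < 2 or bab[:3] == present:
--             return False
--         else:
--             canspeak(bab)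
--     else:
--         return False
--
--     return canspeak(bab)
-- ===== SOURCE B (Python) =====
-- def canspeak(bab):
--     tokens = {'a': 'aya', 'y': 'ye', 'w': 'woo', 'm': 'ma'}
--     prev = None
--     i = 0
--     n = len(bab)
--     while i < n:
--         w = tokens.get(bab[i])
--         if w is None or bab[i:i + len(w)] != w or w == prev:
--             return False
--         prev = w
--         i += len(w)
--     return i > 0
-- ===== Notes on version B (the rewrite author's own statement) =====
-- stated objective: simpler
-- what changed: A's double self-recursion with per-branch prefix/repeat checks is replaced by a single iterative scan that dispatches on the first character via a dict and tracks the previous token to reject repeats.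
import Mathlib
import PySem

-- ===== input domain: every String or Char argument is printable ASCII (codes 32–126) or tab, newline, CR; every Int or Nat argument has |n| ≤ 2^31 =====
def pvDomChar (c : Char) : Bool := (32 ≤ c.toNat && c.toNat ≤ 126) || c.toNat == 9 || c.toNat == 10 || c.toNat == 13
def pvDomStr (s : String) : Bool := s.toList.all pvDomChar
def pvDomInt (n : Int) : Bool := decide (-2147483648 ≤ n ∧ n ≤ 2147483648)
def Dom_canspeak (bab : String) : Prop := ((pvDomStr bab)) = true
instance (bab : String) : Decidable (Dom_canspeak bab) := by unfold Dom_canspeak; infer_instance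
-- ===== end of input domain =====

-- B replaces A's double-recursive prefix matching by a single linear scan with a
-- first-character dispatch table and a previous-token register (objective: simpler).

-- ===== PORT A =====
-- speakList = ['aya', 'ye', 'woo', 'ma']
def pvSpeakList : List (List Char) := [['a','y','a'], ['y','e'], ['w','o','o'], ['m','a']]

-- slice/termination helpers for the port (cited in decreasing_by)
theorem pvSliceFrom2 (cs : List Char) : PySem.List.slice cs (some 2) none = cs.drop 2 := by
  rw [PySem.List.slice_from cs (by norm_num)]; rfl
theorem pvSliceFrom3 (cs : List Char) : PySem.List.slice cs (some 3) none = cs.drop 3 := by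
  rw [PySem.List.slice_from cs (by norm_num)]; rfl
theorem pvSliceTo2 (cs : List Char) : PySem.List.slice cs none (some 2) = cs.take 2 := by
  rw [PySem.List.slice_to cs (by norm_num)]; rfl
theorem pvSliceTo3 (cs : List Char) : PySem.List.slice cs none (some 3) = cs.take 3 := by
  rw [PySem.List.slice_to cs (by norm_num)]; rfl
theorem pvDecA2 (cs : List Char) (h : PySem.List.slice cs none (some 2) ∈ pvSpeakList) :
    (PySem.List.slice cs (some 2) none).length < cs.length := by
  rw [pvSliceFrom2]
  cases cs with
  | nil => rw [pvSliceTo2] at h; simp [pvSpeakList] at h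
  | cons c cs => simp
theorem pvDecA3 (cs : List Char) (h : PySem.List.slice cs none (some 3) ∈ pvSpeakList) :
    (PySem.List.slice cs (some 3) none).length < cs.length := by
  rw [pvSliceFrom3]
  cases cs with
  | nil => rw [pvSliceTo3] at h; simp [pvSpeakList] at h
  | cons c cs => simp

-- transliteration of A's recursion on the code-point list of bab
def canspeakGo (cs : List Char) : Bool :=
  if _h2 : PySem.List.slice cs none (some 2) ∈ pvSpeakList then
    let present := PySem.List.slice cs none (some 2)
    let rest := PySem.List.slice cs (some 2) none
    if rest = [] then true
    else if rest.length < 2 ∨ PySem.List.slice rest none (some 2) = present then false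
    else canspeakGo rest          -- Python calls canspeak(rest) twice (one result discarded); pure, same value
  else if _h3 : PySem.List.slice cs none (some 3) ∈ pvSpeakList then
    let present := PySem.List.slice cs none (some 3)
    let rest := PySem.List.slice cs (some 3) none
    if rest = [] then true
    else if rest.length < 2 ∨ PySem.List.slice rest none (some 3) = present then false
    else canspeakGo rest
  else false
termination_by cs.length
decreasing_by
  · exact pvDecA2 cs _h2
  · exact pvDecA3 cs _h3

def canspeak (bab : String) : Bool := canspeakGo bab.toList

-- ===== PORT B =====
-- tokens = {'a': 'aya', 'y': 'ye', 'w': 'woo', 'm': 'ma'}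
def pvTokens : PySem.Dict Char (List Char) :=
  PySem.Dict.mk [('a', ['a','y','a']), ('y', ['y','e']), ('w', ['w','o','o']), ('m', ['m','a'])]

-- termination helper for the port (cited in decreasing_by)
theorem pvTokCases (c : Char) (w : List Char) (h : PySem.Dict.get? pvTokens c = some w) :
    (c = 'a' ∧ w = ['a','y','a']) ∨ (c = 'y' ∧ w = ['y','e']) ∨
    (c = 'w' ∧ w = ['w','o','o']) ∨ (c = 'm' ∧ w = ['m','a']) := by
  revert h
  simp only [pvTokens, PySem.Dict.get?_mk_cons]
  split_ifs with h1 h2 h3 h4 <;> intro h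
  · exact Or.inl ⟨(eq_of_beq h1).symm, (Option.some_inj.mp h).symm⟩
  · exact Or.inr (Or.inl ⟨(eq_of_beq h2).symm, (Option.some_inj.mp h).symm⟩)
  · exact Or.inr (Or.inr (Or.inl ⟨(eq_of_beq h3).symm, (Option.some_inj.mp h).symm⟩))
  · exact Or.inr (Or.inr (Or.inr ⟨(eq_of_beq h4).symm, (Option.some_inj.mp h).symm⟩))
  · exact absurd h (by simp [PySem.Dict.get?])

-- B's while loop: `rest` is the unconsumed suffix bab[i:], `prev` the previous token
-- (None before the first iteration); the final `i > 0` is `prev.isSome` — i grows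
-- exactly when prev is set, so i > 0 iff a token was consumed iff prev ≠ None.
def pvGoB : List Char → Option (List Char) → Bool
  | [], prev => prev.isSome
  | c :: cs, prev =>
    match _hw : PySem.Dict.get? pvTokens c with
    | none => false
    | some w =>
      if (c :: cs).take w.length ≠ w ∨ prev = some w then false
      else pvGoB ((c :: cs).drop w.length) (some w)
termination_by rest _ => rest.length
decreasing_by
  rcases pvTokCases c w _hw with ⟨_, rfl⟩ | ⟨_, rfl⟩ | ⟨_, rfl⟩ | ⟨_, rfl⟩ <;> simp

def canspeak_alt (bab : String) : Bool := pvGoB bab.toList none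

-- ===== PRECONDITION & SPEC =====
def Spec_canspeak (bab : String) (out : Bool) : Prop := out = canspeak_alt bab
instance (bab : String) (out : Bool) : Decidable (Spec_canspeak bab out) := by unfold Spec_canspeak; infer_instance

-- ===== CLAIM (what is proved, stated in full; the proofs are below) =====
def Claim_equal_canspeak : Prop := ∀ (bab : String), Dom_canspeak bab → Spec_canspeak bab (canspeak bab)

-- ===== LEMMAS AND PROOFS =====

-- unfolding equations for B's loop
theorem pvGoB_nil (prev : Option (List Char)) : pvGoB [] prev = prev.isSome := by
  simp only [pvGoB]

theorem pvGoB_none (c : Char) (cs : List Char) (prev : Option (List Char))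
    (hget : PySem.Dict.get? pvTokens c = none) : pvGoB (c :: cs) prev = false := by
  simp only [pvGoB]
  split
  · rfl
  · next w' hw' => rw [hget] at hw'; cases hw'

theorem pvGoB_cons (c : Char) (cs : List Char) (prev : Option (List Char)) (w : List Char)
    (hget : PySem.Dict.get? pvTokens c = some w) :
    pvGoB (c :: cs) prev =
      if (c :: cs).take w.length ≠ w ∨ prev = some w then false
      else pvGoB ((c :: cs).drop w.length) (some w) := by
  simp only [pvGoB]
  split
  · next hw' => rw [hget] at hw'; cases hw'
  · next w' hw' => rw [hget] at hw'; injection hw' with hw'; subst hw'; rfl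

-- a single leftover character never parses (every token has length ≥ 2)
theorem pvGoB_single (c : Char) (prev : Option (List Char)) : pvGoB [c] prev = false := by
  cases hget : PySem.Dict.get? pvTokens c with
  | none => exact pvGoB_none c [] prev hget
  | some w =>
    rw [pvGoB_cons c [] prev w hget]
    rcases pvTokCases c w hget with ⟨_, rfl⟩ | ⟨_, rfl⟩ | ⟨_, rfl⟩ | ⟨_, rfl⟩ <;> simp

-- prev only matters when the next token would repeat it
theorem pvGoB_prev_irrel (c : Char) (cs w : List Char)
    (hne : (c :: cs).take w.length ≠ w) :
    pvGoB (c :: cs) (some w) = pvGoB (c :: cs) none := by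
  cases hget : PySem.Dict.get? pvTokens c with
  | none => rw [pvGoB_none c cs _ hget, pvGoB_none c cs _ hget]
  | some w' =>
    rw [pvGoB_cons c cs _ w' hget, pvGoB_cons c cs _ w' hget]
    by_cases ht : (c :: cs).take w'.length = w'
    · have hww : w ≠ w' := fun h => hne (h ▸ ht)
      simp [ht, hww]
    · simp [ht]

-- take-2 membership in speakList pins the first two characters
theorem pvShape2 (cs : List Char) (h : cs.take 2 ∈ pvSpeakList) :
    (∃ r, cs = 'y' :: 'e' :: r) ∨ (∃ r, cs = 'm' :: 'a' :: r) := by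
  match cs with
  | [] => simp [pvSpeakList] at h
  | [c] => simp [pvSpeakList] at h
  | c1 :: c2 :: r =>
    simp [pvSpeakList] at h
    rcases h with ⟨h1, h2⟩ | ⟨h1, h2⟩ <;> subst h1 <;> subst h2
    · exact Or.inl ⟨r, rfl⟩
    · exact Or.inr ⟨r, rfl⟩

-- take-3 membership (with take-2 failing) pins the first three characters
theorem pvShape3 (cs : List Char) (h2 : cs.take 2 ∉ pvSpeakList) (h : cs.take 3 ∈ pvSpeakList) :
    (∃ r, cs = 'a' :: 'y' :: 'a' :: r) ∨ (∃ r, cs = 'w' :: 'o' :: 'o' :: r) := by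
  match cs with
  | [] => simp [pvSpeakList] at h
  | [c] => simp [pvSpeakList] at h
  | [c1, c2] => simp [pvSpeakList] at h; simp [pvSpeakList] at h2; tauto
  | c1 :: c2 :: c3 :: r =>
    simp [pvSpeakList] at h
    rcases h with ⟨ha, hb, hc⟩ | ⟨ha, hb, hc⟩ <;> subst ha <;> subst hb <;> subst hc
    · exact Or.inl ⟨r, rfl⟩
    · exact Or.inr ⟨r, rfl⟩

-- the common shape of one consumed token, for both token lengths
theorem pvBranch (c : Char) (wtail cs' : List Char)
    (hget : PySem.Dict.get? pvTokens c = some (c :: wtail))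
    (hIH : canspeakGo cs' = pvGoB cs' none) :
    (if cs' = [] then true
     else if cs'.length < 2 ∨ cs'.take (c :: wtail).length = c :: wtail then false
     else canspeakGo cs') = pvGoB cs' (some (c :: wtail)) := by
  cases cs' with
  | nil => rw [if_pos rfl, pvGoB_nil]; rfl
  | cons d cs'' =>
    rw [if_neg (by simp)]
    by_cases hrep : (d :: cs'').take (c :: wtail).length = d :: wtail ∧ d = c
    · obtain ⟨hrep', hd⟩ := hrep
      subst hd
      rw [if_pos (Or.inr hrep'), pvGoB_cons d cs'' _ (d :: wtail) hget,
        if_pos (Or.inr rfl)]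
    · by_cases hshort : (d :: cs'').length < 2
      · match cs'' with
        | [] => rw [if_pos (Or.inl hshort), pvGoB_single]
        | e :: es => simp at hshort
      · have hne : (d :: cs'').take (c :: wtail).length ≠ c :: wtail := by
          intro h
          have : d = c ∧ (d :: cs'').take (c :: wtail).length = d :: wtail := by
            rw [List.length_cons, List.take_succ_cons] at h ⊢
            obtain ⟨h1, h2⟩ := List.cons_eq_cons.mp h
            exact ⟨h1, by rw [h2]⟩
          exact hrep ⟨this.2, this.1⟩
        rw [if_neg (by tauto), hIH]
        exact (pvGoB_prev_irrel d cs'' (c :: wtail) hne).symm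

theorem pvMain (n : Nat) : ∀ cs : List Char, cs.length ≤ n → canspeakGo cs = pvGoB cs none := by
  induction n with
  | zero =>
    intro cs h
    have : cs = [] := List.eq_nil_of_length_eq_zero (Nat.le_zero.mp h)
    subst this
    rw [canspeakGo, pvGoB_nil]
    rw [pvSliceTo2, pvSliceTo3]
    rw [dif_neg (by simp [pvSpeakList]), dif_neg (by simp [pvSpeakList])]
    rfl
  | succ n ih =>
    intro cs hlen
    by_cases h2 : cs.take 2 ∈ pvSpeakList
    · rcases pvShape2 cs h2 with ⟨r, hr⟩ | ⟨r, hr⟩ <;> subst hr <;> simp only [List.length_cons] at hlen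
      · rw [canspeakGo]
        simp only [pvSliceTo2, pvSliceTo3, pvSliceFrom2, pvSliceFrom3]
        rw [dif_pos (by simp [pvSpeakList])]
        simp only [List.take_succ_cons, List.take_zero, List.drop_succ_cons, List.drop_zero]
        rw [pvGoB_cons 'y' ('e' :: r) none ['y','e'] (by decide)]
        simp only [List.length_cons, List.length_nil, List.take_succ_cons, List.take_zero,
          List.drop_succ_cons, List.drop_zero]
        conv_rhs => rw [if_neg (by decide)]
        exact pvBranch 'y' ['e'] r (by decide) (ih r (by omega))
      · rw [canspeakGo]
        simp only [pvSliceTo2, pvSliceTo3, pvSliceFrom2, pvSliceFrom3]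
        rw [dif_pos (by simp [pvSpeakList])]
        simp only [List.take_succ_cons, List.take_zero, List.drop_succ_cons, List.drop_zero]
        rw [pvGoB_cons 'm' ('a' :: r) none ['m','a'] (by decide)]
        simp only [List.length_cons, List.length_nil, List.take_succ_cons, List.take_zero,
          List.drop_succ_cons, List.drop_zero]
        conv_rhs => rw [if_neg (by decide)]
        exact pvBranch 'm' ['a'] r (by decide) (ih r (by omega))
    · by_cases h3 : cs.take 3 ∈ pvSpeakList
      · rcases pvShape3 cs h2 h3 with ⟨r, hr⟩ | ⟨r, hr⟩ <;> subst hr <;> simp only [List.length_cons] at hlen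
        · rw [canspeakGo]
          simp only [pvSliceTo2, pvSliceTo3, pvSliceFrom2, pvSliceFrom3]
          rw [dif_neg h2, dif_pos (by simp [pvSpeakList])]
          simp only [List.take_succ_cons, List.take_zero, List.drop_succ_cons, List.drop_zero]
          rw [pvGoB_cons 'a' ('y' :: 'a' :: r) none ['a','y','a'] (by decide)]
          simp only [List.length_cons, List.length_nil, List.take_succ_cons, List.take_zero,
            List.drop_succ_cons, List.drop_zero]
          conv_rhs => rw [if_neg (by decide)]
          exact pvBranch 'a' ['y','a'] r (by decide) (ih r (by omega))
        · rw [canspeakGo]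
          simp only [pvSliceTo2, pvSliceTo3, pvSliceFrom2, pvSliceFrom3]
          rw [dif_neg h2, dif_pos (by simp [pvSpeakList])]
          simp only [List.take_succ_cons, List.take_zero, List.drop_succ_cons, List.drop_zero]
          rw [pvGoB_cons 'w' ('o' :: 'o' :: r) none ['w','o','o'] (by decide)]
          simp only [List.length_cons, List.length_nil, List.take_succ_cons, List.take_zero,
            List.drop_succ_cons, List.drop_zero]
          conv_rhs => rw [if_neg (by decide)]
          exact pvBranch 'w' ['o','o'] r (by decide) (ih r (by omega))
      · rw [canspeakGo]
        simp only [pvSliceTo2, pvSliceTo3]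
        rw [dif_neg h2, dif_neg h3]
        cases cs with
        | nil => rw [pvGoB_nil]; rfl
        | cons c cs'' =>
          cases hget : PySem.Dict.get? pvTokens c with
          | none => rw [pvGoB_none c cs'' none hget]
          | some w =>
            have hne : (c :: cs'').take w.length ≠ w := by
              intro ht
              rcases pvTokCases c w hget with ⟨_, he⟩ | ⟨_, he⟩ | ⟨_, he⟩ | ⟨_, he⟩ <;> subst he
              · exact h3 (by rw [show (3:Nat) = (['a','y','a'] : List Char).length from rfl, ht]; simp [pvSpeakList])
              · exact h2 (by rw [show (2:Nat) = (['y','e'] : List Char).length from rfl, ht]; simp [pvSpeakList])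
              · exact h3 (by rw [show (3:Nat) = (['w','o','o'] : List Char).length from rfl, ht]; simp [pvSpeakList])
              · exact h2 (by rw [show (2:Nat) = (['m','a'] : List Char).length from rfl, ht]; simp [pvSpeakList])
            rw [pvGoB_cons c cs'' none w hget, if_pos (Or.inl hne)]

-- ===== VERDICT (by name: the statement is the Claim_ definition above) =====
theorem canspeak_spec : Claim_equal_canspeak := by
  intro bab _
  unfold Spec_canspeak canspeak canspeak_alt
  exact pvMain bab.toList.length bab.toList le_rfl
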